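-- pv_equiv track=rewrite | github.com/manhitv/codesignal | CompanyChallenges/PureStorage.py | longestUncorruptedSegment
-- ===== SOURCE A (Python) =====
-- def longestUncorruptedSegment(sourceArray, destinationArray):
--
--     a = zip(sourceArray,destinationArray )
--     res = []
--     for i, e in enumerate(a):
--         if e[0] == e[1]:
--             res.append(0)
--         else:
--             res.append(1)
--
--     res_start, res_len = 0, 0
--     lenn = 0
--     first = True
--     prev = 0
--     start = 0
--     for i in range(len(res)):
--         if res[i] == 1:
--             lenn = 0
--         else:
--             lenn += 1
--             if prev != 0 or i==0:
--                 start = i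
--             if res_len < lenn:
--                 res_len = lenn
--                 res_start = start
--         prev = res[i]
--
--     return [res_len, res_start]
-- ===== SOURCE B (Python) =====
-- def longestUncorruptedSegment(sourceArray, destinationArray):
--     # Scan the zipped pairs RIGHT-TO-LEFT, tracking the length of the run that
--     # starts at the current position ('lead') and the best run's length plus its
--     # start measured as an offset from the current position; ties go to the run
--     # beginning at the current (leftmost-so-far) position, which reproduces the
--     # first-longest tie-breaking of a forward scan.
--     lead = 0
--     best_len = 0
--     best_start = 0
--     for x, y in reversed(list(zip(sourceArray, destinationArray))):
--         if x == y:
--             lead += 1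
--             if best_len <= lead:
--                 best_len = lead
--                 best_start = 0
--             else:
--                 best_start += 1
--         else:
--             lead = 0
--             if best_len > 0:
--                 best_start += 1
--     return [best_len, best_start]
-- ===== Notes on version B (the rewrite author's own statement) =====
-- stated objective: alternative
-- what changed: B scans the zipped pairs right-to-left tracking the run starting at the current position and the best run's start as a relative offset, instead of A's two-stage forward pass that materialises a 0/1 mismatch list and then does an indexed scan with prev/start bookkeeping.
import Mathlib
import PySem

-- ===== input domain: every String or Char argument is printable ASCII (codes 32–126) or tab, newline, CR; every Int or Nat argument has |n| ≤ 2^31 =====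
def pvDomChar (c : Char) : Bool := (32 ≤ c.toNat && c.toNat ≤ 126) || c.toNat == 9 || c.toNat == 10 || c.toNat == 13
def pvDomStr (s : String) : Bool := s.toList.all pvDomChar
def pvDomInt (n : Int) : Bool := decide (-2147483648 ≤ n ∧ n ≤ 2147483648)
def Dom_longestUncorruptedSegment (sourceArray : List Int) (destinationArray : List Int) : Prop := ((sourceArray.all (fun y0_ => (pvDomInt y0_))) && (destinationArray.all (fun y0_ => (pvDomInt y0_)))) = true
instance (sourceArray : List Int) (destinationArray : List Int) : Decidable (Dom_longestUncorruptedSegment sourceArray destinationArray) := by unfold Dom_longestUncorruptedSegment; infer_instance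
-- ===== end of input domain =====

-- B scans the zipped pairs right-to-left, tracking the run starting at the current
-- position and the best start as a relative offset (objective: alternative).

-- ===== PORT A =====
-- state: (res_start, res_len, lenn, prev, start); body of A's second loop, step for step
def pvStepA (t : Int × Int × Int × Int × Int) (p : Int × Int) : Int × Int × Int × Int × Int :=
  match t with
  | (res_start, res_len, lenn, prev, start) =>
    if p.2 = 1 then (res_start, res_len, 0, p.2, start)
    else
      let lenn' := lenn + 1
      let start' := if prev ≠ 0 ∨ p.1 = 0 then p.1 else start
      if res_len < lenn' then (start', lenn', lenn', p.2, start')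
      else (res_start, res_len, lenn', p.2, start')

def longestUncorruptedSegment (sourceArray : List Int) (destinationArray : List Int) : List Int :=
  -- first loop: build the 0/1 mismatch list by appending, as A does
  let res := (List.zip sourceArray destinationArray).foldl
      (fun acc e => acc ++ [if e.1 = e.2 then (0 : Int) else 1]) []
  -- second loop: for i in range(len(res)) accessing res[i] (always in range, so getD is exact)
  let t := (PySem.List.pyRange 0 (PySem.List.len res) 1).foldl
      (fun t i => pvStepA t (i, PySem.List.pyGetD res i 0)) (0, 0, 0, 0, 0)
  [t.2.1, t.1]

-- ===== PORT B =====
-- state: (lead, best_len, best_start); one step of Source B's reversed loop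
def pvStepBack (u : Int × Int × Int) (p : Int × Int) : Int × Int × Int :=
  match u with
  | (lead, best_len, best_start) =>
    if p.1 = p.2 then
      let lead' := lead + 1
      if best_len ≤ lead' then (lead', lead', 0)
      else (lead', best_len, best_start + 1)
    else
      (0, best_len, if 0 < best_len then best_start + 1 else best_start)

def longestUncorruptedSegment_alt (sourceArray : List Int) (destinationArray : List Int) : List Int :=
  let u := (List.zip sourceArray destinationArray).reverse.foldl pvStepBack (0, 0, 0)
  [u.2.1, u.2.2]

-- ===== PRECONDITION & SPEC =====
def Spec_longestUncorruptedSegment (sourceArray : List Int) (destinationArray : List Int) (out : List Int) : Prop := out = longestUncorruptedSegment_alt sourceArray destinationArray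
instance (sourceArray : List Int) (destinationArray : List Int) (out : List Int) : Decidable (Spec_longestUncorruptedSegment sourceArray destinationArray out) := by unfold Spec_longestUncorruptedSegment; infer_instance

-- ===== CLAIM (what is proved, stated in full; the proofs are below) =====
def Claim_equal_longestUncorruptedSegment : Prop := ∀ (sourceArray : List Int) (destinationArray : List Int), Dom_longestUncorruptedSegment sourceArray destinationArray → Spec_longestUncorruptedSegment sourceArray destinationArray (longestUncorruptedSegment sourceArray destinationArray)

-- ===== LEMMAS AND PROOFS =====

def pvMismatch (e : Int × Int) : Int := if e.1 = e.2 then 0 else 1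

-- proof-only intermediate: the fused forward scan (best_len, best_start, cur_len, cur_start)
def pvFwdStep (u : Int × Int × Int × Int) (p : Int × (Int × Int)) : Int × Int × Int × Int :=
  match u with
  | (best_len, best_start, cur_len, cur_start) =>
    if p.2.1 = p.2.2 then
      let cur_start' := if cur_len = 0 then p.1 else cur_start
      let cur_len' := cur_len + 1
      if cur_len' > best_len then (cur_len', cur_start', cur_len', cur_start')
      else (best_len, best_start, cur_len', cur_start')
    else (best_len, best_start, 0, cur_start)

-- proof-only: B's scan as a foldr (right-to-left over the original list)
def pvBack (l : List (Int × Int)) : Int × Int × Int :=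
  l.foldr (fun x acc => pvStepBack acc x) (0, 0, 0)

-- A's first loop builds the map of pvMismatch over the zipped list
theorem pvResEq (l : List (Int × Int)) (acc : List Int) :
    l.foldl (fun acc e => acc ++ [if e.1 = e.2 then (0 : Int) else 1]) acc
      = acc ++ l.map pvMismatch := by
  induction l generalizing acc with
  | nil => simp
  | cons x xs ih => simp [ih, pvMismatch]

theorem pvEnumerateMap {α β : Type} (f : α → β) (l : List α) (s : Int) :
    PySem.List.enumerate (l.map f) s
      = (PySem.List.enumerate l s).map (fun p => (p.1, f p.2)) := by
  induction l generalizing s with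
  | nil => simp [PySem.List.enumerate_nil]
  | cons x xs ih => simp [PySem.List.enumerate_cons, ih]

-- main invariant part 1: A's two loops and the fused forward scan stay in lock step
theorem pvLoop (l : List (Int × Int)) :
    ∀ (s res_start res_len lenn prev start best_len best_start cur_len cur_start : Int),
    0 ≤ s → 0 ≤ lenn →
    ((prev ≠ 0 ∨ s = 0) ↔ lenn = 0) →
    res_len = best_len → res_start = best_start → lenn = cur_len →
    (lenn ≠ 0 → start = cur_start) →
    (((PySem.List.enumerate l s).foldl
        (fun t p => pvStepA t (p.1, pvMismatch p.2)) (res_start, res_len, lenn, prev, start)).2.1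
      = ((PySem.List.enumerate l s).foldl pvFwdStep (best_len, best_start, cur_len, cur_start)).1
     ∧ ((PySem.List.enumerate l s).foldl
        (fun t p => pvStepA t (p.1, pvMismatch p.2)) (res_start, res_len, lenn, prev, start)).1
      = ((PySem.List.enumerate l s).foldl pvFwdStep (best_len, best_start, cur_len, cur_start)).2.1) := by
  induction l with
  | nil =>
    intro s res_start res_len lenn prev start best_len best_start cur_len cur_start
      hs hl hiff h1 h2 h3 h4
    simp only [PySem.List.enumerate_nil, List.foldl_nil]
    exact ⟨h1, h2⟩
  | cons x xs ih =>
    intro s res_start res_len lenn prev start best_len best_start cur_len cur_start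
      hs hl hiff h1 h2 h3 h4
    simp only [PySem.List.enumerate_cons, List.foldl_cons]
    by_cases hx : x.1 = x.2
    · have hstart : (if prev ≠ 0 ∨ s = 0 then s else start)
          = (if cur_len = 0 then s else cur_start) := by
        by_cases hc : prev ≠ 0 ∨ s = 0
        · have hc0 : cur_len = 0 := h3 ▸ hiff.mp hc
          simp [hc, hc0]
        · have hne : cur_len ≠ 0 := by
            rw [← h3]; intro h0; exact hc (hiff.mpr h0)
          have hsc : start = cur_start := h4 (by rw [h3]; exact hne)
          simp [hc, hne, hsc]
      by_cases hlt : res_len < lenn + 1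
      · have hlt' : cur_len + 1 > best_len := by omega
        have ha : pvStepA (res_start, res_len, lenn, prev, start) ((s, x).1, pvMismatch (s, x).2)
            = ((if prev ≠ 0 ∨ s = 0 then s else start), lenn + 1, lenn + 1, 0,
               (if prev ≠ 0 ∨ s = 0 then s else start)) := by
          simp [pvStepA, pvMismatch, hx, hlt]
        have hb : pvFwdStep (best_len, best_start, cur_len, cur_start) (s, x)
            = (cur_len + 1, (if cur_len = 0 then s else cur_start), cur_len + 1,
               (if cur_len = 0 then s else cur_start)) := by
          simp [pvFwdStep, hx, hlt']
        rw [ha, hb, hstart, h3]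
        exact ih (s + 1) _ _ _ _ _ _ _ _ _ (by omega) (by omega) (by omega) rfl rfl rfl
          (fun _ => rfl)
      · have hlt' : ¬ (cur_len + 1 > best_len) := by omega
        have ha : pvStepA (res_start, res_len, lenn, prev, start) ((s, x).1, pvMismatch (s, x).2)
            = (res_start, res_len, lenn + 1, 0,
               (if prev ≠ 0 ∨ s = 0 then s else start)) := by
          simp [pvStepA, pvMismatch, hx, hlt]
        have hb : pvFwdStep (best_len, best_start, cur_len, cur_start) (s, x)
            = (best_len, best_start, cur_len + 1,
               (if cur_len = 0 then s else cur_start)) := by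
          simp [pvFwdStep, hx, hlt']
        rw [ha, hb, hstart, h3]
        exact ih (s + 1) _ _ _ _ _ _ _ _ _ (by omega) (by omega) (by omega) h1 h2 rfl
          (fun _ => rfl)
    · have ha : pvStepA (res_start, res_len, lenn, prev, start) ((s, x).1, pvMismatch (s, x).2)
          = (res_start, res_len, 0, 1, start) := by
        simp [pvStepA, pvMismatch, hx]
      have hb : pvFwdStep (best_len, best_start, cur_len, cur_start) (s, x)
          = (best_len, best_start, 0, cur_start) := by
        simp [pvFwdStep, hx]
      rw [ha, hb]
      exact ih (s + 1) _ _ _ _ _ _ _ _ _ (by omega) (by omega) (by omega) h1 h2 rfl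
        (fun h => absurd rfl h)

-- structural invariants of the backward scan
theorem pvBackInv (l : List (Int × Int)) :
    0 ≤ (pvBack l).1 ∧ (pvBack l).1 ≤ (pvBack l).2.1 ∧ 0 ≤ (pvBack l).2.2 ∧
    ((pvBack l).2.1 = (pvBack l).1 ↔ (pvBack l).2.2 = 0) := by
  induction l with
  | nil => simp [pvBack]
  | cons x t ih =>
    have h : pvBack (x :: t) = pvStepBack (pvBack t) x := rfl
    obtain ⟨h0, h1, h2, h3⟩ := ih
    rcases hb : pvBack t with ⟨lead, bl, bs⟩
    rw [hb] at h0 h1 h2 h3; simp only at h0 h1 h2 h3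
    rw [h, hb]
    by_cases hx : x.1 = x.2
    · by_cases hle : bl ≤ lead + 1
      · have hs : pvStepBack (lead, bl, bs) x = (lead + 1, lead + 1, 0) := by
          simp [pvStepBack, hx, hle]
        rw [hs]; dsimp only
        refine ⟨by omega, by omega, by omega, by constructor <;> intro hh <;> omega⟩
      · have hs : pvStepBack (lead, bl, bs) x = (lead + 1, bl, bs + 1) := by
          simp [pvStepBack, hx, hle]
        rw [hs]; dsimp only
        refine ⟨by omega, by omega, by omega, by constructor <;> intro hh <;> omega⟩
    · have hs : pvStepBack (lead, bl, bs) x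
          = (0, bl, if 0 < bl then bs + 1 else bs) := by
        simp [pvStepBack, hx]
      rw [hs]; dsimp only
      refine ⟨by omega, by omega, ?_, ?_⟩ <;> split_ifs <;> omega

-- main invariant part 2: the forward scan's answer, combined from a prefix state
-- and the backward characterisation (lead, bl, bs) of the remaining list
def pvCombine (s best_len best_start cur_len cur_start lead bl bs : Int) : Int × Int :=
  if best_len < cur_len + lead then
    (if cur_len + lead < bl then (bl, s + bs)
     else (cur_len + lead, if cur_len = 0 then s else cur_start))
  else (if best_len < bl then (bl, s + bs) else (best_len, best_start))

theorem pvFwdBack (l : List (Int × Int)) :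
    ∀ (s best_len best_start cur_len cur_start : Int),
    0 ≤ cur_len → cur_len ≤ best_len →
    (((PySem.List.enumerate l s).foldl pvFwdStep (best_len, best_start, cur_len, cur_start)).1,
     ((PySem.List.enumerate l s).foldl pvFwdStep (best_len, best_start, cur_len, cur_start)).2.1)
      = pvCombine s best_len best_start cur_len cur_start
          (pvBack l).1 (pvBack l).2.1 (pvBack l).2.2 := by
  induction l with
  | nil =>
    intro s best_len best_start cur_len cur_start hc0 hcb
    have hnil : pvBack ([] : List (Int × Int)) = (0, 0, 0) := rfl
    simp only [PySem.List.enumerate_nil, List.foldl_nil, hnil]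
    unfold pvCombine
    split_ifs <;> (try rfl) <;> (try simp only [Prod.mk.injEq, and_true, true_and]) <;> omega
  | cons x t ih =>
    intro s best_len best_start cur_len cur_start hc0 hcb
    obtain ⟨hl0, hlb, hbs0, hiff⟩ := pvBackInv t
    have hcons : pvBack (x :: t) = pvStepBack (pvBack t) x := rfl
    rcases hb : pvBack t with ⟨lead, bl, bs⟩
    rw [hb] at hl0 hlb hbs0 hiff ih; simp only at hl0 hlb hbs0 hiff ih
    simp only [PySem.List.enumerate_cons, List.foldl_cons, hcons, hb]
    by_cases hx : x.1 = x.2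
    · by_cases hle : bl ≤ lead + 1
      · have hs' : pvStepBack (lead, bl, bs) x = (lead + 1, lead + 1, 0) := by
          simp [pvStepBack, hx, hle]
        rw [hs']; dsimp only
        by_cases hgt : cur_len + 1 > best_len
        · have hstep : pvFwdStep (best_len, best_start, cur_len, cur_start) (s, x)
              = (cur_len + 1, (if cur_len = 0 then s else cur_start), cur_len + 1,
                 (if cur_len = 0 then s else cur_start)) := by
            simp [pvFwdStep, hx, hgt]
          rw [hstep, ih (s + 1) _ _ _ _ (by omega) (by omega)]
          unfold pvCombine
          split_ifs <;> (try rfl) <;> (try simp only [Prod.mk.injEq, and_true, true_and]) <;> omega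
        · have hstep : pvFwdStep (best_len, best_start, cur_len, cur_start) (s, x)
              = (best_len, best_start, cur_len + 1,
                 (if cur_len = 0 then s else cur_start)) := by
            simp [pvFwdStep, hx, hgt]
          rw [hstep, ih (s + 1) _ _ _ _ (by omega) (by omega)]
          unfold pvCombine
          split_ifs <;> (try rfl) <;> (try simp only [Prod.mk.injEq, and_true, true_and]) <;> omega
      · have hs' : pvStepBack (lead, bl, bs) x = (lead + 1, bl, bs + 1) := by
          simp [pvStepBack, hx, hle]
        rw [hs']; dsimp only
        have hbs1 : 1 ≤ bs := by
          rcases (show bl = lead ∨ lead < bl by omega) with h | h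
          · omega
          · by_contra hc
            exact absurd (hiff.mpr (by omega)) (by omega)
        by_cases hgt : cur_len + 1 > best_len
        · have hstep : pvFwdStep (best_len, best_start, cur_len, cur_start) (s, x)
              = (cur_len + 1, (if cur_len = 0 then s else cur_start), cur_len + 1,
                 (if cur_len = 0 then s else cur_start)) := by
            simp [pvFwdStep, hx, hgt]
          rw [hstep, ih (s + 1) _ _ _ _ (by omega) (by omega)]
          unfold pvCombine
          split_ifs <;> (try rfl) <;> (try simp only [Prod.mk.injEq, and_true, true_and]) <;> omega
        · have hstep : pvFwdStep (best_len, best_start, cur_len, cur_start) (s, x)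
              = (best_len, best_start, cur_len + 1,
                 (if cur_len = 0 then s else cur_start)) := by
            simp [pvFwdStep, hx, hgt]
          rw [hstep, ih (s + 1) _ _ _ _ (by omega) (by omega)]
          unfold pvCombine
          split_ifs <;> (try rfl) <;> (try simp only [Prod.mk.injEq, and_true, true_and]) <;> omega
    · have hs' : pvStepBack (lead, bl, bs) x
          = (0, bl, if 0 < bl then bs + 1 else bs) := by
        simp [pvStepBack, hx]
      rw [hs']; dsimp only
      have hstep : pvFwdStep (best_len, best_start, cur_len, cur_start) (s, x)
          = (best_len, best_start, 0, cur_start) := by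
        simp [pvFwdStep, hx]
      rw [hstep, ih (s + 1) _ _ _ _ (by omega) (by omega)]
      have hbs1 : lead < bl → 1 ≤ bs := by
        intro h
        by_contra hc
        exact absurd (hiff.mpr (by omega)) (by omega)
      unfold pvCombine
      split_ifs <;> (try rfl) <;> (try simp only [Prod.mk.injEq, and_true, true_and]) <;> omega

-- ===== VERDICT (by name: the statement is the Claim_ definition above) =====
theorem longestUncorruptedSegment_spec : Claim_equal_longestUncorruptedSegment := by
  intro src dst _
  unfold Spec_longestUncorruptedSegment longestUncorruptedSegment longestUncorruptedSegment_alt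
  simp only [pvResEq, List.nil_append, List.foldl_reverse]
  have hA : ((PySem.List.pyRange 0
        (PySem.List.len ((List.zip src dst).map pvMismatch)) 1).map
        (fun j => (j, PySem.List.pyGetD ((List.zip src dst).map pvMismatch) j 0))).foldl
        pvStepA ((0 : Int), (0 : Int), (0 : Int), (0 : Int), (0 : Int))
      = (PySem.List.pyRange 0 (PySem.List.len ((List.zip src dst).map pvMismatch)) 1).foldl
        (fun t i => pvStepA t (i, PySem.List.pyGetD ((List.zip src dst).map pvMismatch) i 0))
        ((0 : Int), (0 : Int), (0 : Int), (0 : Int), (0 : Int)) :=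
    List.foldl_map
  rw [← hA, ← PySem.List.enumerate_eq_map_pyRange, pvEnumerateMap, List.foldl_map]
  have key := pvLoop (List.zip src dst) 0 0 0 0 0 0 0 0 0 0 (by omega) (by omega) (by omega)
    rfl rfl rfl (fun _ => rfl)
  rw [key.1, key.2]
  have hfb := pvFwdBack (List.zip src dst) 0 0 0 0 0 (by omega) (by omega)
  obtain ⟨hl0, hlb, hbs0, hiff⟩ := pvBackInv (List.zip src dst)
  have hback : (List.zip src dst).foldr (fun x acc => pvStepBack acc x) (0, 0, 0)
      = pvBack (List.zip src dst) := rfl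
  rcases hb : pvBack (List.zip src dst) with ⟨lead, bl, bs⟩
  rw [hb] at hfb hl0 hlb hbs0 hiff; simp only at hl0 hlb hbs0 hiff hfb
  rw [hback, hb]; dsimp only
  rw [Prod.ext_iff] at hfb
  obtain ⟨h1, h2⟩ := hfb
  simp only at h1 h2
  rw [h1, h2]
  have hbs1 : lead < bl → 1 ≤ bs := by
    intro h
    by_contra hc
    exact absurd (hiff.mpr (by omega)) (by omega)
  unfold pvCombine
  split_ifs <;> dsimp only <;> simp only [List.cons.injEq, and_true, true_and] <;> omega
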